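-- pv_equiv track=rewrite | github.com/aorursy/new-nb-2 | lihess_pratice1.py | groupFeatures
-- ===== SOURCE A (Python) =====
-- def groupFeatures(features): # groupFeatures함수 정의
--     features_bin = []
--     features_cat = []
--     features_etc = []
--     for feature in features: # 각 특정에 맞는 리스트에 해당 컬럼을 추가하는 과정
--         if 'bin' in feature:
--             features_bin.append(feature)
--         elif 'cat' in feature:
--             features_cat.append(feature)
--         elif 'id' in feature or 'target' in feature:
--             continue
--         else:
--             features_etc.append(feature)
--     return features_bin, features_cat, features_etc
-- ===== SOURCE B (Python) =====
-- def groupFeatures(features):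
--     features_bin = [f for f in features if 'bin' in f]
--     features_cat = [f for f in features if 'cat' in f and 'bin' not in f]
--     features_etc = [f for f in features
--                     if 'bin' not in f and 'cat' not in f and 'id' not in f and 'target' not in f]
--     return features_bin, features_cat, features_etc
-- ===== Notes on version B (the rewrite author's own statement) =====
-- stated objective: simpler
-- what changed: Replaces the single priority-ordered loop with three accumulators by three independent filter comprehensions whose negated guards encode the elif priority.
import Mathlib
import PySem

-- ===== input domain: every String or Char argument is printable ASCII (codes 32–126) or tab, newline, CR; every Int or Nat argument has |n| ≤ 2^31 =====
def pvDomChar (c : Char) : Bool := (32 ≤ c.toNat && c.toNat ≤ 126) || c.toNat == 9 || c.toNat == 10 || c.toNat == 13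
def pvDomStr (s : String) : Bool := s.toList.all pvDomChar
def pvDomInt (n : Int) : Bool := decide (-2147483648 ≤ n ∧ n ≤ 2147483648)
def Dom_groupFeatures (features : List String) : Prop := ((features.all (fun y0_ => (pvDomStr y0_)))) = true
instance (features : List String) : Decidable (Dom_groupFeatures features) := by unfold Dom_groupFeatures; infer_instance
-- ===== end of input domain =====

-- B replaces A's single priority-ordered loop with three independent filters; same return value, proved equal.


-- ===== PORT A =====
-- one pass: three accumulators, elif priority bin > cat > (id/target skipped) > etc
def groupFeatures (features : List String) : List String × List String × List String :=
  (features.foldl (fun acc feature =>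
      if PySem.Str.isIn "bin" feature then (acc.1 ++ [feature], acc.2.1, acc.2.2)
      else if PySem.Str.isIn "cat" feature then (acc.1, acc.2.1 ++ [feature], acc.2.2)
      else if PySem.Str.isIn "id" feature || PySem.Str.isIn "target" feature then acc
      else (acc.1, acc.2.1, acc.2.2 ++ [feature]))
    ([], [], []))

-- ===== PORT B =====
def groupFeatures_alt (features : List String) : List String × List String × List String :=
  (features.filter (fun f => PySem.Str.isIn "bin" f),
   features.filter (fun f => PySem.Str.isIn "cat" f && !PySem.Str.isIn "bin" f),
   features.filter (fun f => !PySem.Str.isIn "bin" f && !PySem.Str.isIn "cat" f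
                    && !PySem.Str.isIn "id" f && !PySem.Str.isIn "target" f))

-- ===== PRECONDITION & SPEC =====
def Spec_groupFeatures (features : List String) (out : List String × List String × List String) : Prop := out = groupFeatures_alt features
instance (features : List String) (out : List String × List String × List String) : Decidable (Spec_groupFeatures features out) := by unfold Spec_groupFeatures; infer_instance

-- ===== CLAIM (what is proved, stated in full; the proofs are below) =====
def Claim_equal_groupFeatures : Prop := ∀ (features : List String), Dom_groupFeatures features → Spec_groupFeatures features (groupFeatures features)

-- ===== LEMMAS AND PROOFS =====
lemma groupFeatures_foldl_acc (features : List String)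
    (b c e : List String) :
    features.foldl (fun acc feature =>
      if PySem.Str.isIn "bin" feature then (acc.1 ++ [feature], acc.2.1, acc.2.2)
      else if PySem.Str.isIn "cat" feature then (acc.1, acc.2.1 ++ [feature], acc.2.2)
      else if PySem.Str.isIn "id" feature || PySem.Str.isIn "target" feature then acc
      else (acc.1, acc.2.1, acc.2.2 ++ [feature])) (b, c, e)
    = (b ++ features.filter (fun f => PySem.Str.isIn "bin" f),
       c ++ features.filter (fun f => PySem.Str.isIn "cat" f && !PySem.Str.isIn "bin" f),
       e ++ features.filter (fun f => !PySem.Str.isIn "bin" f && !PySem.Str.isIn "cat" f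
                    && !PySem.Str.isIn "id" f && !PySem.Str.isIn "target" f)) := by
  induction features generalizing b c e with
  | nil => simp
  | cons f t ih =>
    simp only [List.foldl_cons, List.filter_cons, PySem.Str.isIn_eq]
    by_cases hb : PySem.Chars.isIn "bin".toList f.toList <;>
      by_cases hc : PySem.Chars.isIn "cat".toList f.toList <;>
        by_cases hi : (PySem.Chars.isIn "id".toList f.toList
            || PySem.Chars.isIn "target".toList f.toList) = true <;>
          simp_all [ih] <;> rcases hi with h|h <;> simp_all

-- ===== VERDICT (by name: the statement is the Claim_ definition above) =====
theorem groupFeatures_spec : Claim_equal_groupFeatures := by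
  intro features _
  show groupFeatures features = groupFeatures_alt features
  rw [groupFeatures, groupFeatures_alt, groupFeatures_foldl_acc]
  simp
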